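-- pv_equiv track=rewrite | github.com/Sathishr424/LeetcodeProblems | 3824-NumberOfUniqueXorTripletsI/3824-NumberOfUniqueXorTripletsI.py | uniqueXorTriplets
-- ===== SOURCE A (Python) =====
-- from typing import List
--
-- def uniqueXorTriplets(nums: List[int]) -> int:
--     n = len(nums)
--
--     bit_count = len(bin(n)) - 2
--     bit = (1 << bit_count) - 1
--     maxi = n | bit
--
--     add = n >= 3
--     ret = n + add
--
--     for x in range(maxi, n-1, -1):
--         for num in range(n, 0, -1):
--             val = x ^ num
--             if val <= n:
--                 if (val % 2 == 0 and val+1 <= n) or (val % 2 == 1 and val-1 >= 1):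
--                     return max(ret, x + add)
--
--     return ret
-- ===== SOURCE B (Python) =====
-- from typing import List
--
-- def uniqueXorTriplets(nums: List[int]) -> int:
--     n = len(nums)
--     return n if n < 3 else 1 << n.bit_length()
-- ===== Notes on version B (the rewrite author's own statement) =====
-- stated objective: simpler
-- what changed: Replaced the nested descending search over x and num by the closed form: n for n < 3, else 1 << n.bit_length(), proved equal to what the search returns.
import Mathlib
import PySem

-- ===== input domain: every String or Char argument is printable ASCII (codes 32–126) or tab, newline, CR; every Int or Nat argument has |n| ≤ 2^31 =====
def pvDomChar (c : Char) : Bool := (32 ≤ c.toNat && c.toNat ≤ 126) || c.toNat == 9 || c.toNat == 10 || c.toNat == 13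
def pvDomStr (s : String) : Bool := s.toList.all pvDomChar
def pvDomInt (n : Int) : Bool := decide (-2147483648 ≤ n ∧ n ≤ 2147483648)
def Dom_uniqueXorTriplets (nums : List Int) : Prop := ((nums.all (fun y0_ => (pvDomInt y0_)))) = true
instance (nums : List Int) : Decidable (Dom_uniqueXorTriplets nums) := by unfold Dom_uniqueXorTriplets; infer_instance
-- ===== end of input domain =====

-- B replaces A's nested descending search with a closed form (n for n < 3, else 1 shifted by n.bit_length()), proved equal: simpler, not measured faster.

-- ===== PORT A =====

-- len(bin(n)) - 2 for n ≥ 0 (bin(0) = '0b0' has one digit; otherwise the bit length, which is Nat.size)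
def pyBinDigits (n : Nat) : Nat := if n = 0 then 1 else Nat.size n

def uniqueXorTriplets (nums : List Int) : Int :=
  let n : Int := (nums.length : Int)
  let bit_count : Nat := pyBinDigits nums.length
  let bit : Int := (1 : Int) <<< bit_count - 1    -- (1 << bit_count) - 1
  let maxi : Int := PySem.Int.bor n bit
  let add : Int := if n ≥ 3 then 1 else 0
  let ret : Int := n + add
  -- the two nested loops with the early `return` = findSome? over the two ranges
  match (PySem.List.pyRange maxi (n - 1) (-1)).findSome? (fun x =>
      (PySem.List.pyRange n 0 (-1)).findSome? (fun num =>
        let val := PySem.Int.bxor x num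
        if val ≤ n ∧ ((PySem.Int.mod val 2 = 0 ∧ val + 1 ≤ n) ∨ (PySem.Int.mod val 2 = 1 ∧ val - 1 ≥ 1))
        then some (max ret (x + add)) else none)) with
  | some r => r
  | none => ret

-- ===== PORT B =====
def uniqueXorTriplets_alt (nums : List Int) : Int :=
  let n := nums.length
  if n < 3 then (n : Int) else (1 : Int) <<< Nat.size n

-- ===== PRECONDITION & SPEC =====
def Spec_uniqueXorTriplets (nums : List Int) (out : Int) : Prop := out = uniqueXorTriplets_alt nums
instance (nums : List Int) (out : Int) : Decidable (Spec_uniqueXorTriplets nums out) := by unfold Spec_uniqueXorTriplets; infer_instance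

-- ===== CLAIM (what is proved, stated in full; the proofs are below) =====
def Claim_equal_uniqueXorTriplets : Prop := ∀ (nums : List Int), Dom_uniqueXorTriplets nums → Spec_uniqueXorTriplets nums (uniqueXorTriplets nums)

-- ===== LEMMAS AND PROOFS =====

-- all-ones mask absorbs any number below it under `or`
theorem or_mask (b m : Nat) (h : m < 2 ^ b) : m ||| (2 ^ b - 1) = 2 ^ b - 1 := by
  apply Nat.eq_of_testBit_eq
  intro i
  rw [Nat.testBit_or, Nat.testBit_two_pow_sub_one]
  by_cases hi : i < b
  · simp [hi]
  · simp only [hi, decide_false, Bool.or_false]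
    exact Nat.testBit_lt_two_pow (Nat.lt_of_lt_of_le h (Nat.pow_le_pow_right (by norm_num) (Nat.le_of_not_lt hi)))

-- xor against the all-ones mask is subtraction from it
theorem xor_mask (b : Nat) : ∀ m, m < 2 ^ b → (2 ^ b - 1) ^^^ m = 2 ^ b - 1 - m := by
  induction b with
  | zero => intro m h; simp at h; simp [h]
  | succ b ih =>
    intro m h
    have hP : 1 ≤ 2 ^ b := Nat.one_le_two_pow
    have h2 : 2 ^ (b + 1) = 2 * 2 ^ b := by ring
    have hq : m / 2 < 2 ^ b := by omega
    have hbit1 : 2 ^ (b + 1) - 1 = Nat.bit true (2 ^ b - 1) := by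
      simp [Nat.bit]; omega
    have hbitm : m = Nat.bit (decide (m % 2 = 1)) (m / 2) := by
      by_cases hm : m % 2 = 1 <;> simp [Nat.bit, hm] <;> omega
    rw [hbit1, hbitm, Nat.xor_bit]
    have hih := ih (m / 2) hq
    by_cases hm : m % 2 = 1 <;> simp [hm, Nat.bit, hih] <;> omega

-- a findSome? whose function returns the constant `c` wherever it returns, fires as soon as some member satisfies p
theorem findSome?_const {α β : Type} (p : α → Prop) [DecidablePred p] (c : β) :
    ∀ (l : List α) (a : α), a ∈ l → p a →
      l.findSome? (fun x => if p x then some c else none) = some c := by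
  intro l
  induction l with
  | nil => intro a ha; simp at ha
  | cons hd tl ih =>
    intro a ha hp
    rw [List.findSome?_cons]
    by_cases hhd : p hd
    · simp [hhd]
    · simp only [hhd, if_false]
      rcases List.mem_cons.mp ha with rfl | hmem
      · exact absurd hp hhd
      · exact ih a hmem hp

-- ===== VERDICT (by name: the statement is the Claim_ definition above) =====
theorem uniqueXorTriplets_spec : Claim_equal_uniqueXorTriplets := by
  intro nums _
  unfold Spec_uniqueXorTriplets uniqueXorTriplets uniqueXorTriplets_alt
  generalize nums.length = n
  by_cases hn : n < 3
  · interval_cases n <;> decide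
  · -- n ≥ 3
    rw [Nat.not_lt] at hn
    set b := Nat.size n with hb
    have hn0 : n ≠ 0 := by omega
    have hub : n < 2 ^ b := Nat.lt_size_self n
    have hb2 : 2 ≤ b := by
      rw [hb]; rw [show (2 : Nat) = 1 + 1 from rfl]
      have : 1 < Nat.size n := by rw [Nat.lt_size]; omega
      omega
    have hlb : 2 ^ (b - 1) ≤ n := by
      have : b - 1 < Nat.size n := by omega
      exact Nat.lt_size.mp this
    have hhalf : 2 ^ b = 2 * 2 ^ (b - 1) := by
      rw [← pow_succ']
      congr 1; omega
    -- the port's quantities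
    have hdig : pyBinDigits n = b := by simp [pyBinDigits, hn0, hb]
    have hshift : (1 : Int) <<< b = ((2 ^ b : Nat) : Int) := by
      simp [Int.shiftLeft_eq]
    have hbit : (1 : Int) <<< (pyBinDigits n) - 1 = ((2 ^ b - 1 : Nat) : Int) := by
      rw [hdig, hshift]
      have : 1 ≤ 2 ^ b := Nat.one_le_two_pow
      push_cast [this]; ring
    have hmaxi : PySem.Int.bor (n : Int) ((1 : Int) <<< (pyBinDigits n) - 1) = ((2 ^ b - 1 : Nat) : Int) := by
      rw [hbit, PySem.Int.bor_natCast, or_mask b n hub]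
    have hadd : ((n : Int) ≥ 3) = True := by simp; exact_mod_cast hn
    -- the value returned from inside the loop
    set mask : Nat := 2 ^ b - 1 with hmask
    set v : Nat := mask - n with hv
    have hvlt : v < 2 ^ (b - 1) := by omega
    have hvn : v + 1 ≤ n := by omega
    -- inner findSome? at x = mask returns `some (max ret (mask + 1))`: exhibit a witness num
    have hinner : (PySem.List.pyRange (n : Int) 0 (-1)).findSome? (fun num =>
        if PySem.Int.bxor ((mask : Nat) : Int) num ≤ (n : Int) ∧
            ((PySem.Int.mod (PySem.Int.bxor ((mask : Nat) : Int) num) 2 = 0 ∧ PySem.Int.bxor ((mask : Nat) : Int) num + 1 ≤ (n : Int)) ∨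
             (PySem.Int.mod (PySem.Int.bxor ((mask : Nat) : Int) num) 2 = 1 ∧ PySem.Int.bxor ((mask : Nat) : Int) num - 1 ≥ 1))
        then some (max ((n : Int) + 1) (((mask : Nat) : Int) + 1)) else none) = some (max ((n : Int) + 1) (((mask : Nat) : Int) + 1)) := by
      by_cases hv1 : v = 1
      · -- witness num = n - 1; val = mask ^^^ (n-1) = v + 1 = 2
        apply findSome?_const _ _ _ ((n : Int) - 1)
        · rw [PySem.List.mem_pyRange_neg_one]; constructor <;> omega
        · have hcast : ((n : Int) - 1) = (((n - 1 : Nat)) : Int) := by omega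
          rw [hcast, PySem.Int.bxor_natCast, xor_mask b (n - 1) (by omega)]
          rw [show 2 ^ b - 1 - (n - 1) = 2 by omega]
          push_cast
          exact ⟨by omega, Or.inl ⟨by decide, by omega⟩⟩
      · -- witness num = n; val = v, either even with v+1 ≤ n, or odd with v ≥ 2
        apply findSome?_const _ _ _ ((n : Int))
        · rw [PySem.List.mem_pyRange_neg_one]; constructor <;> omega
        · rw [PySem.Int.bxor_natCast, xor_mask b n hub]
          have hvv : 2 ^ b - 1 - n = v := by omega
          rw [hvv]
          have hmod : PySem.Int.mod ((v : Nat) : Int) 2 = ((v % 2 : Nat) : Int) :=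
            by exact_mod_cast PySem.Int.mod_natCast v 2
          refine ⟨by omega, ?_⟩
          by_cases hpar : v % 2 = 0
          · left
            rw [hmod, hpar]
            exact ⟨by simp, by omega⟩
          · right
            have h1 : v % 2 = 1 := by omega
            have hv2 : 2 ≤ v := by omega
            rw [hmod, h1]
            exact ⟨by simp, by omega⟩
    -- outer loop: first x = maxi already returns
    have houter : PySem.List.pyRange (((mask : Nat) : Int)) ((n : Int) - 1) (-1) =
        ((mask : Nat) : Int) :: PySem.List.pyRange (((mask : Nat) : Int) - 1) ((n : Int) - 1) (-1) := by
      apply PySem.List.pyRange_neg_one_cons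
      omega
    simp only [hmaxi, hadd, if_pos trivial, houter, List.findSome?_cons]
    simp only [ge_iff_le] at hinner ⊢
    rw [hinner]
    have hc : max ((n : Int) + 1) (((mask : Nat) : Int) + 1) = (1 : Int) <<< Nat.size n := by
      rw [← hb, hshift]
      have h1 : 1 ≤ 2 ^ b := Nat.one_le_two_pow
      omega
    rw [hc, if_neg (by omega)]
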